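-- pv_equiv track=rewrite | github.com/ethereum/research | mimc_stark/fft.py | inv_fft_at_point
-- ===== SOURCE A (Python) =====
-- def inv_fft_at_point(vals, modulus, root_of_unity, x):
--     if len(vals) == 1:
--         return vals[0]
--     # 1/2 in the field
--     half = (modulus + 1)//2
--     # 1/w
--     inv_root = pow(root_of_unity, len(vals)-1, modulus)
--     # f(-x) in evaluation form
--     f_of_minus_x_vals = vals[len(vals)//2:] + vals[:len(vals)//2]
--     # e(x) = (f(x) + f(-x)) / 2 in evaluation form
--     evens = [(f+g) * half % modulus for f,g in zip(vals, f_of_minus_x_vals)]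
--     # o(x) = (f(x) - f(-x)) / 2 in evaluation form
--     odds = [(f-g) * half % modulus for f,g in zip(vals, f_of_minus_x_vals)]
--     # e(x^2) + coordinate * x * o(x^2) in evaluation form
--     comb = [(o * x * inv_root**i + e) % modulus for i, (o, e) in enumerate(zip(odds, evens))]
--     return inv_fft_at_point(comb[:len(comb)//2], modulus, root_of_unity ** 2 % modulus, x**2 % modulus)
-- ===== SOURCE B (Python) =====
-- def inv_fft_at_point(vals, modulus, root_of_unity, x):
--     # Iterative halving: each round fuses A's three comprehensions into one
--     # pass that builds only the kept half, with a running (reduced) power of 1/w.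
--     while len(vals) > 1:
--         n = len(vals)
--         half = (modulus + 1) // 2
--         inv_root = pow(root_of_unity, n - 1, modulus)
--         pw = 1
--         new_vals = []
--         for i in range(n // 2):
--             f = vals[i]
--             g = vals[i + n // 2]
--             new_vals.append(((f - g) * half * x * pw + (f + g) * half) % modulus)
--             pw = pw * inv_root % modulus
--         vals = new_vals
--         root_of_unity = root_of_unity ** 2 % modulus
--         x = x ** 2 % modulus
--     return vals[0]
-- ===== Notes on version B (the rewrite author's own statement) =====
-- stated objective: faster
-- what changed: A's recursion with a rotated copy, three full-length comprehensions and a slice is replaced by an iterative halving loop whose single pass builds only the kept half of each round, maintaining a running modulus-reduced power of 1/w instead of A's unreduced big-int inv_root**i.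
import Mathlib
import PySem

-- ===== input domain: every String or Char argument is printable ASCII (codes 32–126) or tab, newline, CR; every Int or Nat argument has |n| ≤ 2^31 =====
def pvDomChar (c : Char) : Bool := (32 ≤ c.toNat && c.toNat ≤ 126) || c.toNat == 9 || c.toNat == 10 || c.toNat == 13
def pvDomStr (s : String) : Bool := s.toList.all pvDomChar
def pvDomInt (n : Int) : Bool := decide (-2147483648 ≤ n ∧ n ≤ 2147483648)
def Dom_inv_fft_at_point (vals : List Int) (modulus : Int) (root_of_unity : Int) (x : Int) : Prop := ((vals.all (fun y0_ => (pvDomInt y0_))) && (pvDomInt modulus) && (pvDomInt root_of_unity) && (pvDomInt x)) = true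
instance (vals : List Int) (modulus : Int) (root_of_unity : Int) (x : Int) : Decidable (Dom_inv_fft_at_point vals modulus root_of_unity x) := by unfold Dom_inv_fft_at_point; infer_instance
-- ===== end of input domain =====

-- B replaces A's recursion (rotate + three full-length comprehensions + slice) by an
-- iterative halving loop whose single pass builds only the kept half of each round,
-- keeping a running modulus-reduced power of 1/w instead of A's unreduced inv_root**i.

-- ===== PORT A =====
-- A's recursion, fuel = vals.length is a strict upper bound on the depth (each call
-- strictly halves a nonempty list); the fuel-0 branch is never reached for vals ≠ [].
def invFftA : Nat → List Int → Int → Int → Int → Int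
  | 0, vals, _, _, _ => vals.headI                  -- unreachable under Pre_
  | fuel + 1, vals, modulus, root_of_unity, x =>
    if vals.length = 1 then vals.headI              -- vals[0]
    else if vals.length = 0 then vals.headI         -- Python recurses forever on []; outside Pre_
    else
      let n := vals.length
      let half := PySem.Int.floordiv (modulus + 1) 2
      let inv_root := PySem.Int.powMod root_of_unity (n - 1) modulus
      let f_of_minus_x_vals :=
        PySem.List.slice vals (some ((n / 2 : Nat) : Int)) none ++
        PySem.List.slice vals none (some ((n / 2 : Nat) : Int))
      let evens := (vals.zip f_of_minus_x_vals).map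
        (fun p => PySem.Int.mod ((p.1 + p.2) * half) modulus)
      let odds := (vals.zip f_of_minus_x_vals).map
        (fun p => PySem.Int.mod ((p.1 - p.2) * half) modulus)
      -- inv_root**i: the enumerate index i is ≥ 0, so the Int exponent is exactly i.toNat
      let comb := (PySem.List.enumerate (odds.zip evens)).map
        (fun p => PySem.Int.mod (p.2.1 * x * inv_root ^ p.1.toNat + p.2.2) modulus)
      invFftA fuel (PySem.List.slice comb none (some ((comb.length / 2 : Nat) : Int)))
        modulus (PySem.Int.mod (root_of_unity ^ 2) modulus) (PySem.Int.mod (x ^ 2) modulus)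

def inv_fft_at_point (vals : List Int) (modulus : Int) (root_of_unity : Int) (x : Int) : Int :=
  invFftA vals.length vals modulus root_of_unity x

-- ===== PORT B =====
-- the for-loop of Source B: new_vals for i in range(k), k = n//2, as structural recursion on
-- the c = k - i iterations left; pw is the running power of 1/w
def invFftAltInner (vals : List Int) (modulus : Int) (half : Int) (x : Int) (inv_root : Int)
    (k : Nat) : Nat → Nat → Int → List Int
  | 0, _, _ => []
  | c + 1, i, pw =>
    -- vals[i] and vals[i + n//2]: indices are in range (0 ≤ i < k, i + k < 2k ≤ len vals)
    (PySem.Int.mod ((vals.getD i 0 - vals.getD (i + k) 0) * half * x * pw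
        + (vals.getD i 0 + vals.getD (i + k) 0) * half) modulus) ::
      invFftAltInner vals modulus half x inv_root k c (i + 1) (PySem.Int.mod (pw * inv_root) modulus)

-- the while-loop of Source B; fuel = initial vals.length bounds the number of rounds
-- (each round strictly halves), the fuel-0 branch is never reached for vals ≠ []
def invFftAltLoop : Nat → List Int → Int → Int → Int → Int
  | 0, vals, _, _, _ => vals.headI                  -- unreachable under Pre_
  | fuel + 1, vals, modulus, root_of_unity, x =>
    if 1 < vals.length then
      let n := vals.length
      let half := PySem.Int.floordiv (modulus + 1) 2
      let inv_root := PySem.Int.powMod root_of_unity (n - 1) modulus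
      let new_vals := invFftAltInner vals modulus half x inv_root (n / 2) (n / 2) 0 1
      invFftAltLoop fuel new_vals modulus (PySem.Int.mod (root_of_unity ^ 2) modulus)
        (PySem.Int.mod (x ^ 2) modulus)
    else vals.headI                                 -- vals[0]; [] raises in Python, outside Pre_

def inv_fft_at_point_alt (vals : List Int) (modulus : Int) (root_of_unity : Int) (x : Int) : Int :=
  invFftAltLoop vals.length vals modulus root_of_unity x

-- ===== PRECONDITION & SPEC =====
-- Pre_ excludes exactly the inputs where Python A does not return: vals = [] (infinite
-- recursion, RecursionError) and len(vals) ≥ 2 with modulus = 0 (pow/% raise there).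
def Pre_inv_fft_at_point (vals : List Int) (modulus : Int) (root_of_unity : Int) (x : Int) : Prop :=
  vals ≠ [] ∧ (vals.length = 1 ∨ modulus ≠ 0)
instance (vals : List Int) (modulus : Int) (root_of_unity : Int) (x : Int) : Decidable (Pre_inv_fft_at_point vals modulus root_of_unity x) := by unfold Pre_inv_fft_at_point; infer_instance

def pvWitness_inv_fft_at_point : List Int × Int × Int × Int := ([3, 1, 4, 1], 337, 85, 9)

def Spec_inv_fft_at_point (vals : List Int) (modulus : Int) (root_of_unity : Int) (x : Int) (out : Int) : Prop := out = inv_fft_at_point_alt vals modulus root_of_unity x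
instance (vals : List Int) (modulus : Int) (root_of_unity : Int) (x : Int) (out : Int) : Decidable (Spec_inv_fft_at_point vals modulus root_of_unity x out) := by unfold Spec_inv_fft_at_point; infer_instance

-- ===== CLAIM (what is proved, stated in full; the proofs are below) =====
def Claim_equal_inv_fft_at_point : Prop := ∀ (vals : List Int) (modulus : Int) (root_of_unity : Int) (x : Int), Dom_inv_fft_at_point vals modulus root_of_unity x → Pre_inv_fft_at_point vals modulus root_of_unity x → Spec_inv_fft_at_point vals modulus root_of_unity x (inv_fft_at_point vals modulus root_of_unity x)

-- ===== LEMMAS AND PROOFS =====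

-- Python-% depends on its first argument only through emod:
theorem pymod_congr (a a' b : Int) (h : a % b = a' % b) : PySem.Int.mod a b = PySem.Int.mod a' b := by
  simp only [PySem.Int.mod]
  have d1 : a.fmod b - a % b = b * (a / b - a.fdiv b) := by rw [Int.fmod_def, Int.emod_def]; ring
  have d2 : a'.fmod b - a' % b = b * (a' / b - a'.fdiv b) := by rw [Int.fmod_def, Int.emod_def]; ring
  set u := a / b - a.fdiv b with hu
  set v := a' / b - a'.fdiv b with hv
  have hd : a.fmod b - a'.fmod b = b * (u - v) := by rw [mul_sub]; omega
  rcases lt_trichotomy b 0 with hb | hb | hb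
  · have b1 := PySem.Int.mod_neg_bounds (a := a) (b := b) hb
    have b2 := PySem.Int.mod_neg_bounds (a := a') (b := b) hb
    simp only [PySem.Int.mod] at b1 b2
    have ht : u - v = 0 := by
      by_contra hne
      rcases lt_or_gt_of_ne hne with hlt | hgt
      · have : b * (u - v) ≥ b * (-1) := mul_le_mul_of_nonpos_left (by omega) (by omega)
        omega
      · have : b * (u - v) ≤ b * 1 := mul_le_mul_of_nonpos_left (by omega) (by omega)
        omega
    rw [ht, mul_zero] at hd; omega
  · subst hb
    simp only [Int.fmod_def, Int.emod_def, Int.zero_mul, sub_zero] at *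
    omega
  · have b1 : 0 ≤ a.fmod b ∧ a.fmod b < b := ⟨Int.fmod_nonneg_of_pos a hb, Int.fmod_lt_of_pos a hb⟩
    have b2 : 0 ≤ a'.fmod b ∧ a'.fmod b < b := ⟨Int.fmod_nonneg_of_pos a' hb, Int.fmod_lt_of_pos a' hb⟩
    have ht : u - v = 0 := by
      by_contra hne
      rcases lt_or_gt_of_ne hne with hlt | hgt
      · have : b * (u - v) ≤ b * (-1) := mul_le_mul_of_nonneg_left (by omega) (by omega)
        omega
      · have : b * (u - v) ≥ b * 1 := mul_le_mul_of_nonneg_left (by omega) (by omega)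
        omega
    rw [ht, mul_zero] at hd; omega

-- (a %py b) ≡ a modulo b (in the emod sense)
theorem pymod_emod (a b : Int) : (PySem.Int.mod a b) % b = a % b := by
  simp only [PySem.Int.mod]
  rw [Int.fmod_def]
  exact Int.sub_mul_emod_self_left a b (a.fdiv b)

-- the value A's round assigns to position t (for t < len/2), as a closed form
def combA (vals : List Int) (modulus : Int) (inv_root : Int) (x : Int) (half : Int) (t : Nat) : Int :=
  PySem.Int.mod
    ((PySem.Int.mod ((vals.getD t 0 - vals.getD (t + vals.length / 2) 0) * half) modulus) * x
        * inv_root ^ t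
      + PySem.Int.mod ((vals.getD t 0 + vals.getD (t + vals.length / 2) 0) * half) modulus)
    modulus

-- A's rotated list vals[n//2:] + vals[:n//2]
def fMinus (vals : List Int) : List Int :=
  PySem.List.slice vals (some ((vals.length / 2 : Nat) : Int)) none ++
  PySem.List.slice vals none (some ((vals.length / 2 : Nat) : Int))

-- A's comb list, written out
def combList (vals : List Int) (modulus : Int) (inv_root : Int) (x : Int) (half : Int) : List Int :=
  (PySem.List.enumerate
    (((vals.zip (fMinus vals)).map (fun p => PySem.Int.mod ((p.1 - p.2) * half) modulus)).zip
     ((vals.zip (fMinus vals)).map (fun p => PySem.Int.mod ((p.1 + p.2) * half) modulus)))).map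
    (fun p => PySem.Int.mod (p.2.1 * x * inv_root ^ p.1.toNat + p.2.2) modulus)

theorem length_fMinus (vals : List Int) : (fMinus vals).length = vals.length := by
  simp only [fMinus, PySem.List.slice_from_natCast, PySem.List.slice_to_natCast,
    List.length_append, List.length_drop, List.length_take]
  omega

theorem length_combList (vals : List Int) (modulus inv_root x half : Int) :
    (combList vals modulus inv_root x half).length = vals.length := by
  simp [combList, PySem.List.length_enumerate, length_fMinus]

-- the kept half of A's comb, elementwise
theorem combTake_eq_map (vals : List Int) (modulus inv_root x half : Int) (h2 : 2 ≤ vals.length) :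
    (combList vals modulus inv_root x half).take (vals.length / 2)
    = (List.range (vals.length / 2)).map (fun t => combA vals modulus inv_root x half t) := by
  apply List.ext_getElem
  · simp [length_combList]; omega
  · intro t ht1 ht2
    have hlt : t < vals.length / 2 := by
      have := ht1; simp [length_combList] at this; omega
    have htv : t < vals.length := by omega
    have htf : t + vals.length / 2 < vals.length := by omega
    simp only [List.getElem_take, List.getElem_map, List.getElem_range]
    simp only [combList]
    simp only [List.getElem_map, PySem.List.getElem_enumerate, List.getElem_zip]
    simp only [combA]
    have hfm : (fMinus vals)[t]'(by rw [length_fMinus]; omega) = vals[t + vals.length / 2] := by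
      simp only [fMinus]
      rw [List.getElem_append_left]
      · simp only [PySem.List.slice_from_natCast, List.getElem_drop]
        congr 1
        omega
      · simp only [PySem.List.slice_from_natCast, List.length_drop]
        omega
    simp only [hfm]
    simp only [List.getD_eq_getElem vals 0 htv, List.getD_eq_getElem vals 0 htf]
    simp

-- B's inner loop produces exactly those values, provided pw ≡ inv_root^i (mod modulus)
theorem inner_eq_map (vals : List Int) (modulus half x inv_root : Int) :
    ∀ (c i : Nat) (pw : Int), pw % modulus = inv_root ^ i % modulus →
      invFftAltInner vals modulus half x inv_root (vals.length / 2) c i pw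
        = (List.range c).map (fun t => combA vals modulus inv_root x half (i + t)) := by
  intro c
  induction c with
  | zero => intro i pw _; simp [invFftAltInner]
  | succ c ih =>
    intro i pw hpw
    rw [invFftAltInner]
    rw [List.range_succ_eq_map, List.map_cons, List.map_map]
    congr 1
    · -- head element
      simp only [combA, Nat.add_zero]
      apply pymod_congr
      have e1 : Int.ModEq modulus
          ((vals.getD i 0 - vals.getD (i + vals.length / 2) 0) * half)
          (PySem.Int.mod ((vals.getD i 0 - vals.getD (i + vals.length / 2) 0) * half) modulus) :=
        (pymod_emod _ _).symm
      have e2 : Int.ModEq modulus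
          ((vals.getD i 0 + vals.getD (i + vals.length / 2) 0) * half)
          (PySem.Int.mod ((vals.getD i 0 + vals.getD (i + vals.length / 2) 0) * half) modulus) :=
        (pymod_emod _ _).symm
      have hp : Int.ModEq modulus pw (inv_root ^ i) := hpw
      exact Int.ModEq.add (Int.ModEq.mul (Int.ModEq.mul e1 (Int.ModEq.refl x)) hp) e2
    · -- tail
      rw [ih (i + 1) (PySem.Int.mod (pw * inv_root) modulus)
        (by rw [pymod_emod, pow_succ]; exact Int.ModEq.mul hpw (Int.ModEq.refl inv_root))]
      apply List.map_congr_left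
      intro t _
      simp only [Function.comp]
      congr 1
      omega

theorem loop_eq : ∀ (fuel : Nat) (vals : List Int) (m r x : Int), vals.length ≤ fuel →
    vals ≠ [] → invFftA fuel vals m r x = invFftAltLoop fuel vals m r x := by
  intro fuel
  induction fuel with
  | zero => intro vals m r x _ _; rw [invFftA, invFftAltLoop]
  | succ fuel ih =>
    intro vals m r x hN hne
    by_cases h1 : vals.length = 1
    · rw [invFftA, invFftAltLoop, if_pos h1, if_neg (by omega : ¬ 1 < vals.length)]
    · have h0 : vals.length ≠ 0 := fun h => hne (List.length_eq_zero_iff.mp h)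
      have h2 : 2 ≤ vals.length := by omega
      rw [invFftA, invFftAltLoop, if_neg h1, if_neg (by omega : ¬ vals.length = 0),
        if_pos (by omega : 1 < vals.length)]
      show invFftA fuel
          (PySem.List.slice
            (combList vals m (PySem.Int.powMod r (vals.length - 1) m) x (PySem.Int.floordiv (m + 1) 2))
            none
            (some (((combList vals m (PySem.Int.powMod r (vals.length - 1) m) x
                (PySem.Int.floordiv (m + 1) 2)).length / 2 : Nat) : Int)))
          m (PySem.Int.mod (r ^ 2) m) (PySem.Int.mod (x ^ 2) m)
        = invFftAltLoop fuel
            (invFftAltInner vals m (PySem.Int.floordiv (m + 1) 2) x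
              (PySem.Int.powMod r (vals.length - 1) m) (vals.length / 2) (vals.length / 2) 0 1)
            m (PySem.Int.mod (r ^ 2) m) (PySem.Int.mod (x ^ 2) m)
      rw [length_combList, PySem.List.slice_to_natCast, combTake_eq_map _ _ _ _ _ h2,
        inner_eq_map vals m (PySem.Int.floordiv (m + 1) 2) x
          (PySem.Int.powMod r (vals.length - 1) m) (vals.length / 2) 0 1 (by simp)]
      simp only [Nat.zero_add]
      apply ih
      · simp only [List.length_map, List.length_range]; omega
      · have : vals.length / 2 ≠ 0 := by omega
        simp [List.range_eq_nil]
        omega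

-- ===== VERDICT (by name: the statement is the Claim_ definition above) =====
theorem inv_fft_at_point_spec : Claim_equal_inv_fft_at_point := by
  intro vals modulus root_of_unity x _hdom hpre
  unfold Spec_inv_fft_at_point inv_fft_at_point_alt inv_fft_at_point
  exact loop_eq vals.length vals modulus root_of_unity x le_rfl hpre.1
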